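-- pv_equiv track=rewrite | github.com/chrislucas/hackerrank-lp-python | builtin/Lambda/src/xplore/XploreTrailingZeros.py | countFactor2And5V2
-- ===== SOURCE A (Python) =====
-- def count(value, divisor):
--     acc = 0
--     while value % divisor == 0:
--         value //= divisor
--         acc += 1
--     return acc
--
-- def countFactor2And5V2(value):
--     acc2, acc5 = (0, 0)
--     for i in range(value, 0, -1):
--         if i % 2 == 0:
--             acc2 += count(i, 2)
--         if i % 5 == 0:
--             acc5 += count(i, 5)
--     return acc2, acc5
-- ===== SOURCE B (Python) =====
-- def countFactor2And5V2(value):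
--     # Legendre's formula: the exponent of prime p in value! is sum of value // p^k
--     def legendre(p):
--         total, pk = 0, p
--         while pk <= value:
--             total += value // pk
--             pk *= p
--         return total
--     return (legendre(2), legendre(5))
-- ===== Notes on version B (the rewrite author's own statement) =====
-- stated objective: faster
-- what changed: Replaces the per-integer trial-division loop over range(value,0,-1) with Legendre's formula, summing value // p^k for p = 2 and 5.
import Mathlib
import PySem

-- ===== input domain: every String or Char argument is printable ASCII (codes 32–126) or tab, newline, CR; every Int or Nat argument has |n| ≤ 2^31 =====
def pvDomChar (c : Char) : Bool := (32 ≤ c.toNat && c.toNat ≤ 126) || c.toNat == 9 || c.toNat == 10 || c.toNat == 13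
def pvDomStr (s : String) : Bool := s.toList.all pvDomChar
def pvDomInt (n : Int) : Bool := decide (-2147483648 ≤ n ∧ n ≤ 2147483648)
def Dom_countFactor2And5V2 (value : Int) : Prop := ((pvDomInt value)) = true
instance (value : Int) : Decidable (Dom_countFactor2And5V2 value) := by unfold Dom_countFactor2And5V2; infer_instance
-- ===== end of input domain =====

-- B replaces A's per-integer trial division over range(value,0,-1) by Legendre's formula
-- (sum of value // p^k for p = 2, 5), an asymptotically faster algorithm.

-- ===== PORT A =====
-- count(value, divisor): while value % divisor == 0: value //= divisor; acc += 1
-- (guard '1 ≤ value ∧ 2 ≤ divisor' only makes the recursion total; A only calls it so)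
def pvCountA (value divisor : Int) : Int :=
  if h : PySem.Int.mod value divisor = 0 ∧ 1 ≤ value ∧ 2 ≤ divisor then
    pvCountA (PySem.Int.floordiv value divisor) divisor + 1
  else 0
termination_by value.toNat
decreasing_by
  have h2 : 0 < divisor := by omega
  rw [PySem.Int.floordiv_eq_ediv_of_pos h2]
  have hv : value = (value.toNat : Int) := by omega
  have hd : divisor = (divisor.toNat : Int) := by omega
  have hnat : value.toNat / divisor.toNat < value.toNat := Nat.div_lt_self (by omega) (by omega)
  have hc : value / divisor = ((value.toNat / divisor.toNat : ℕ) : Int) := by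
    rw [hv, hd]; norm_cast
  omega

def countFactor2And5V2 (value : Int) : Int × Int :=
  (PySem.List.pyRange value 0 (-1)).foldl
    (fun (acc : Int × Int) i =>
      let acc2 := if PySem.Int.mod i 2 = 0 then acc.1 + pvCountA i 2 else acc.1
      let acc5 := if PySem.Int.mod i 5 = 0 then acc.2 + pvCountA i 5 else acc.2
      (acc2, acc5)) (0, 0)

-- ===== PORT B =====
-- legendre(p): total = 0; pk = p; while pk <= value: total += value // pk; pk *= p
-- (guard '2 ≤ p ∧ 1 ≤ pk' only makes the recursion total; B only calls it so)
def pvLegendre (value p pk : Int) : Int :=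
  if h : pk ≤ value ∧ 2 ≤ p ∧ 1 ≤ pk then
    PySem.Int.floordiv value pk + pvLegendre value p (pk * p)
  else 0
termination_by (value + 1 - pk).toNat
decreasing_by
  have : pk * 2 ≤ pk * p := by nlinarith
  omega

def countFactor2And5V2_alt (value : Int) : Int × Int :=
  (pvLegendre value 2 2, pvLegendre value 5 5)

-- ===== PRECONDITION & SPEC =====
def Spec_countFactor2And5V2 (value : Int) (out : Int × Int) : Prop := out = countFactor2And5V2_alt value
instance (value : Int) (out : Int × Int) : Decidable (Spec_countFactor2And5V2 value out) := by unfold Spec_countFactor2And5V2; infer_instance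

-- ===== CLAIM (what is proved, stated in full; the proofs are below) =====
def Claim_equal_countFactor2And5V2 : Prop := ∀ (value : Int), Dom_countFactor2And5V2 value → Spec_countFactor2And5V2 value (countFactor2And5V2 value)

-- ===== LEMMAS AND PROOFS =====

-- pvCountA on positive naturals is the p-adic valuation
theorem pvCountA_eq_padicValNat (p : ℕ) [Fact p.Prime] (hp : 2 ≤ p) :
    ∀ n : ℕ, 1 ≤ n → pvCountA (n : Int) (p : Int) = (padicValNat p n : Int) := by
  intro n
  induction n using Nat.strong_induction_on with
  | _ n ih =>
    intro hn
    rw [pvCountA]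
    by_cases hdvd : p ∣ n
    · rw [dif_pos]
      · have hdiv : PySem.Int.floordiv (n : Int) (p : Int) = ((n / p : ℕ) : Int) := by
          exact_mod_cast PySem.Int.floordiv_natCast n p
        rw [hdiv]
        have hlt : n / p < n := Nat.div_lt_self (by omega) (by omega)
        have hpos : 1 ≤ n / p := Nat.one_le_div_iff (by omega) |>.mpr (Nat.le_of_dvd (by omega) hdvd)
        rw [ih (n / p) hlt hpos]
        have h1 : 1 ≤ padicValNat p n := one_le_padicValNat_of_dvd (by omega) hdvd
        have := padicValNat.div (p := p) hdvd
        omega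
      · refine ⟨?_, by exact_mod_cast hn, by exact_mod_cast hp⟩
        rw [PySem.Int.mod_eq_zero_iff_dvd]
        exact_mod_cast hdvd
    · rw [dif_neg, padicValNat.eq_zero_of_not_dvd hdvd]
      · simp
      · intro hcon
        apply hdvd
        have := (PySem.Int.mod_eq_zero_iff_dvd (n : Int) (p : Int)).mp hcon.1
        exact_mod_cast this

-- sum of g over the countdown list range(n, 0, -1)
theorem sum_map_pyRange_desc (g : Int → Int) (n : ℕ) :
    ((PySem.List.pyRange (n : Int) 0 (-1)).map g).sum = ∑ i ∈ Finset.range n, g ((i : Int) + 1) := by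
  induction n with
  | zero => simp [PySem.List.pyRange_neg_one_eq_nil (by omega : (0:Int) ≤ 0)]
  | succ m ih =>
    rw [PySem.List.pyRange_neg_one_cons (by exact_mod_cast Nat.succ_pos m)]
    have h1 : ((m : Int) + 1) - 1 = (m : Int) := by ring
    push_cast
    rw [h1]
    simp only [List.map_cons, List.sum_cons]
    rw [ih, Finset.sum_range_succ]
    push_cast
    ring

-- A's foldl with the two guarded accumulators is a pair of list sums
theorem foldl_pair_eq (l : List Int) (a b : Int) :
    l.foldl (fun (acc : Int × Int) i =>
      let acc2 := if PySem.Int.mod i 2 = 0 then acc.1 + pvCountA i 2 else acc.1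
      let acc5 := if PySem.Int.mod i 5 = 0 then acc.2 + pvCountA i 5 else acc.2
      (acc2, acc5)) (a, b)
    = (a + (l.map (fun i => if PySem.Int.mod i 2 = 0 then pvCountA i 2 else 0)).sum,
       b + (l.map (fun i => if PySem.Int.mod i 5 = 0 then pvCountA i 5 else 0)).sum) := by
  induction l generalizing a b with
  | nil => simp
  | cons x xs ih =>
    simp only [List.foldl_cons, List.map_cons, List.sum_cons, ih]
    simp only [Prod.mk.injEq]
    refine ⟨?_, ?_⟩ <;> (split_ifs <;> ring)

-- the guarded count term equals the p-adic valuation (0 when p does not divide)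
theorem guarded_term_eq (p : ℕ) [Fact p.Prime] (hp : 2 ≤ p) (i : ℕ) :
    (if PySem.Int.mod ((i : Int) + 1) (p : Int) = 0 then pvCountA ((i : Int) + 1) (p : Int) else 0)
      = (padicValNat p (i + 1) : Int) := by
  have hcast : ((i : Int) + 1) = ((i + 1 : ℕ) : Int) := by push_cast; ring
  rw [hcast]
  by_cases hdvd : p ∣ (i + 1)
  · rw [if_pos, pvCountA_eq_padicValNat p hp (i + 1) (by omega)]
    rw [PySem.Int.mod_eq_zero_iff_dvd]
    exact_mod_cast hdvd
  · rw [if_neg, padicValNat.eq_zero_of_not_dvd hdvd]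
    · simp
    · intro hcon
      apply hdvd
      have := (PySem.Int.mod_eq_zero_iff_dvd _ _).mp hcon
      exact_mod_cast this

-- the sum of the p-adic valuations of 1..n is the valuation of n!
theorem sum_padicValNat_factorial (p : ℕ) [Fact p.Prime] (n : ℕ) :
    ∑ i ∈ Finset.range n, padicValNat p (i + 1) = padicValNat p (Nat.factorial n) := by
  induction n with
  | zero => simp
  | succ m ih =>
    rw [Finset.sum_range_succ, ih, Nat.factorial_succ,
        padicValNat.mul (by omega) (Nat.factorial_ne_zero m)]
    ring

-- B's loop computes the Legendre sum, starting from pk = p^j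
theorem pvLegendre_eq_sum (p : ℕ) [Fact p.Prime] (hp : 2 ≤ p) (n : ℕ) :
    ∀ k j : ℕ, 1 ≤ j → Nat.log p n + 1 - j ≤ k →
      pvLegendre (n : Int) (p : Int) ((p ^ j : ℕ) : Int)
        = ∑ i ∈ Finset.Ico j (Nat.log p n + 1), ((n / p ^ i : ℕ) : Int) := by
  intro k
  induction k with
  | zero =>
    intro j hj hk
    rw [pvLegendre]
    have hb : Nat.log p n < j := by omega
    have hgt : ∀ i, j ≤ i → n < p ^ i := by
      intro i hi
      by_contra hle
      push_neg at hle
      have hn0 : n ≠ 0 := by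
        intro h0; subst h0
        have : 1 ≤ p ^ i := Nat.one_le_pow _ _ (by omega)
        omega
      have := (Nat.pow_le_iff_le_log (by omega) hn0).mp hle
      omega
    rw [dif_neg]
    · symm
      apply Finset.sum_eq_zero
      intro i hi
      simp only [Finset.mem_Ico] at hi
      have : n / p ^ i = 0 := Nat.div_eq_of_lt (hgt i hi.1)
      simp [this]
    · intro hcon
      have : (p ^ j : ℕ) ≤ n := by exact_mod_cast hcon.1
      exact absurd (hgt j le_rfl) (by omega)
  | succ m ih =>
    intro j hj hk
    by_cases hle : (p ^ j : ℕ) ≤ n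
    · rw [pvLegendre, dif_pos]
      · have hpk : ((p ^ j : ℕ) : Int) * (p : Int) = ((p ^ (j + 1) : ℕ) : Int) := by
          push_cast; ring
        have hfd : PySem.Int.floordiv (n : Int) ((p ^ j : ℕ) : Int) = ((n / p ^ j : ℕ) : Int) := by
          exact_mod_cast PySem.Int.floordiv_natCast n (p ^ j)
        have hn0 : n ≠ 0 := by
          intro h0; subst h0
          have : 1 ≤ p ^ j := Nat.one_le_pow _ _ (by omega)
          omega
        have hjlog : j ≤ Nat.log p n := (Nat.pow_le_iff_le_log (by omega) hn0).mp hle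
        rw [hpk, hfd, ih (j + 1) (by omega) (by omega),
           Finset.sum_eq_sum_Ico_succ_bot (show j < Nat.log p n + 1 by omega)
             (fun i => ((n / p ^ i : ℕ) : Int))]
      · refine ⟨by exact_mod_cast hle, by exact_mod_cast hp, ?_⟩
        have : 1 ≤ p ^ j := Nat.one_le_pow _ _ (by omega)
        exact_mod_cast this
    · rw [pvLegendre, dif_neg]
      · symm
        apply Finset.sum_eq_zero
        intro i hi
        simp only [Finset.mem_Ico] at hi
        have hji : p ^ j ≤ p ^ i := Nat.pow_le_pow_right (by omega) hi.1
        have : n / p ^ i = 0 := Nat.div_eq_of_lt (by omega)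
        simp [this]
      · intro hcon
        have : (p ^ j : ℕ) ≤ n := by exact_mod_cast hcon.1
        omega

-- each side, for a nonnegative argument ↑n, equals the valuation of n!
theorem sideA_eq (p : ℕ) [Fact p.Prime] (hp : 2 ≤ p) (n : ℕ) :
    ((PySem.List.pyRange (n : Int) 0 (-1)).map
        (fun i => if PySem.Int.mod i (p : Int) = 0 then pvCountA i (p : Int) else 0)).sum
      = (padicValNat p (Nat.factorial n) : Int) := by
  rw [sum_map_pyRange_desc]
  rw [← sum_padicValNat_factorial p n]
  push_cast
  apply Finset.sum_congr rfl
  intro i _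
  exact_mod_cast guarded_term_eq p hp i

theorem sideB_eq (p : ℕ) [Fact p.Prime] (hp : 2 ≤ p) (n : ℕ) :
    pvLegendre (n : Int) (p : Int) ((p ^ 1 : ℕ) : Int) = (padicValNat p (Nat.factorial n) : Int) := by
  rw [pvLegendre_eq_sum p hp n (Nat.log p n) 1 le_rfl (by omega)]
  rw [padicValNat_factorial (p := p) (n := n) (b := Nat.log p n + 1) (by omega)]
  push_cast
  rfl

-- ===== VERDICT (by name: the statement is the Claim_ definition above) =====
theorem countFactor2And5V2_spec : Claim_equal_countFactor2And5V2 := by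
  unfold Claim_equal_countFactor2And5V2
  intro value _
  unfold Spec_countFactor2And5V2
  haveI : Fact (Nat.Prime 2) := ⟨by norm_num⟩
  haveI : Fact (Nat.Prime 5) := ⟨by norm_num⟩
  by_cases hpos : 1 ≤ value
  · obtain ⟨n, rfl⟩ : ∃ n : ℕ, value = (n : Int) :=
      ⟨value.toNat, (Int.toNat_of_nonneg (by omega)).symm⟩
    unfold countFactor2And5V2 countFactor2And5V2_alt
    rw [foldl_pair_eq]
    have h2 : ((2:ℕ) : Int) = (2 : Int) := by norm_num
    have h5 : ((5:ℕ) : Int) = (5 : Int) := by norm_num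
    have hA2 := sideA_eq 2 (by norm_num) n
    have hA5 := sideA_eq 5 (by norm_num) n
    have hB2 := sideB_eq 2 (by norm_num) n
    have hB5 := sideB_eq 5 (by norm_num) n
    rw [h2] at hA2 hB2
    rw [h5] at hA5 hB5
    simp only [pow_one] at hB2 hB5
    norm_num at hB2 hB5
    simp only [Prod.mk.injEq, zero_add]
    exact ⟨hA2.trans hB2.symm, hA5.trans hB5.symm⟩
  · have hnil : PySem.List.pyRange value 0 (-1) = [] :=
      PySem.List.pyRange_neg_one_eq_nil (by omega)
    unfold countFactor2And5V2 countFactor2And5V2_alt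
    rw [hnil]
    rw [pvLegendre, dif_neg (by omega), pvLegendre, dif_neg (by omega)]
    rfl
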